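-- pv_equiv track=rewrite | github.com/pangeran-bottor/coding_challenges | codechef/april_2020_div2/sqrdsub2.py | solve
-- ===== SOURCE A (Python) =====
-- from collections import defaultdict
--
-- def solve(N, A):
--
--     for i in range(N):
--         if A[i] % 4 == 0:
--             A[i] = 2
--         elif A[i] % 2 == 0:
--             A[i] = 1
--         else:
--             A[i] = 0
--
--     result = 0
--     prevsum = defaultdict(lambda: 0)
--     currsum = 0
--
--     for i in range(N):
--         currsum += A[i]
--
--         if currsum == 1:
--             result += 1
--
--         if currsum - 1 in prevsum:
--             result += prevsum[currsum - 1]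
--
--         prevsum[currsum] += 1
--
--     final_result = N*(N+1) // 2 - result
--     return final_result
-- ===== SOURCE B (Python) =====
-- def solve(N, A):
--     for i in range(N):
--         if A[i] % 4 == 0:
--             A[i] = 2
--         elif A[i] % 2 == 0:
--             A[i] = 1
--         else:
--             A[i] = 0
--
--     def at_most(k):
--         total = 0
--         left = 0
--         s = 0
--         for right in range(N):
--             s += A[right]
--             while s > k:
--                 s -= A[left]
--                 left += 1
--             total += right - left + 1
--         return total
--
--     result = at_most(1) - at_most(0)
--     return N * (N + 1) // 2 - result
-- ===== Notes on version B (the rewrite author's own statement) =====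
-- stated objective: alternative
-- what changed: The defaultdict-of-prefix-sums counting pass is replaced by a monotone two-pointer sliding window: since the transformed values are nonnegative, subarrays with sum exactly 1 are counted as at_most(1) - at_most(0), maintaining only two pointers and a running window sum instead of a hashmap of prefix sums.
import Mathlib
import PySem

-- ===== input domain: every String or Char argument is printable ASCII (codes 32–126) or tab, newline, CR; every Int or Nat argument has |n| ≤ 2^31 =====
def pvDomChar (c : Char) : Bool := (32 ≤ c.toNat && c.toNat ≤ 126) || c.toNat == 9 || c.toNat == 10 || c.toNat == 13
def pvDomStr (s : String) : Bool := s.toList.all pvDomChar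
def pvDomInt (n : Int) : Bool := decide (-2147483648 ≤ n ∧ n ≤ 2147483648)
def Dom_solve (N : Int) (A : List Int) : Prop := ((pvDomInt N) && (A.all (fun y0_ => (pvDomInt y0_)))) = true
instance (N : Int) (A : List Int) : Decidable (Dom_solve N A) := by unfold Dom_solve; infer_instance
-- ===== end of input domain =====

-- B replaces A's defaultdict-of-prefix-sums counting pass by a two-pointer sliding window
-- (at_most(1) - at_most(0) over the nonnegative transformed values); the in-place transform
-- loop is kept verbatim, and the equivalence proved here is about the RETURN value only
-- (both Pythons mutate the list argument identically).

-- ===== PORT A =====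
-- shared transform loop: `for i in range(N): A[i] = 2 / 1 / 0` (identical first loop of both Pythons)
def pvTrans (x : Int) : Int :=
  if PySem.Int.mod x 4 = 0 then 2 else if PySem.Int.mod x 2 = 0 then 1 else 0

def pvTransform (N : Int) (A : List Int) : List Int :=
  (PySem.List.pyRange 0 N 1).foldl
    (fun l i => PySem.List.pySetD l i (pvTrans (PySem.List.pyGetD l i 0))) A

-- one iteration of A's counting loop; state = (result, prevsum, currsum)
def pvStepA (st : Int × PySem.Dict Int Int × Int) (x : Int) : Int × PySem.Dict Int Int × Int :=
  let currsum := st.2.2 + x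
  let r1 := st.1 + (if currsum = 1 then 1 else 0)
  let r2 := r1 + (if st.2.1.contains (currsum - 1) then st.2.1.getD (currsum - 1) 0 else 0)
  (r2, st.2.1.modify currsum 0 (· + 1), currsum)

def solve (N : Int) (A : List Int) : Int :=
  let t := pvTransform N A
  let st := (PySem.List.pyRange 0 N 1).foldl
      (fun st i => pvStepA st (PySem.List.pyGetD t i 0)) (0, PySem.Dict.empty, 0)
  PySem.Int.floordiv (N * (N + 1)) 2 - st.1

-- ===== PORT B =====
-- the `while s > k: s -= A[left]; left += 1` loop; fuel (= len(A)) only totalises it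
def pvShrink (t : List Int) (k : Int) : Nat → Int × Int → Int × Int
  | 0, sl => sl
  | fuel + 1, (s, left) =>
    if k < s then pvShrink t k fuel (s - PySem.List.pyGetD t left 0, left + 1) else (s, left)

-- one iteration of at_most's for-loop; state = (total, left, s)
def pvStepB (t : List Int) (k : Int) (st : Int × Int × Int) (right : Int) : Int × Int × Int :=
  let s := st.2.2 + PySem.List.pyGetD t right 0
  let p := pvShrink t k t.length (s, st.2.1)
  (st.1 + (right - p.2 + 1), p.2, p.1)

def pvAtMost (t : List Int) (N : Int) (k : Int) : Int :=
  ((PySem.List.pyRange 0 N 1).foldl (pvStepB t k) (0, 0, 0)).1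

def solve_alt (N : Int) (A : List Int) : Int :=
  let t := pvTransform N A
  let result := pvAtMost t N 1 - pvAtMost t N 0
  PySem.Int.floordiv (N * (N + 1)) 2 - result

-- ===== PRECONDITION & SPEC =====
-- Pre_ excludes exactly the inputs where A raises IndexError: N larger than len(A).
def Pre_solve (N : Int) (A : List Int) : Prop := N ≤ (A.length : Int)
instance (N : Int) (A : List Int) : Decidable (Pre_solve N A) := by unfold Pre_solve; infer_instance
def pvWitness_solve : Int × List Int := (3, [4, 2, 7])

def Spec_solve (N : Int) (A : List Int) (out : Int) : Prop := out = solve_alt N A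
instance (N : Int) (A : List Int) (out : Int) : Decidable (Spec_solve N A out) := by unfold Spec_solve; infer_instance

-- ===== CLAIM (what is proved, stated in full; the proofs are below) =====
def Claim_equal_solve : Prop := ∀ (N : Int) (A : List Int), Dom_solve N A → Pre_solve N A → Spec_solve N A (solve N A)

-- ===== LEMMAS AND PROOFS =====

-- S u a = sum of the first a transformed values (the prefix sums both algorithms reason about)
def pvS (u : List Int) (a : Nat) : Int := (u.take a).sum

-- number of a ≤ m with S(m+1) - S a = 1 (what A's dict pass adds at step m)
def pvCntEq (u : List Int) (m : Nat) : Int :=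
  (((List.range (m + 1)).map (fun a => pvS u a)).count (pvS u (m + 1) - 1) : Int)

def pvResA (u : List Int) : Int := ((List.range u.length).map (fun m => pvCntEq u m)).sum

-- number of a ≤ m with S(m+1) - S a ≤ k (what at_most(k) adds at step m)
def pvCntLe (u : List Int) (k : Int) (m : Nat) : Int :=
  (((List.range (m + 1)).countP (fun a => decide (pvS u (m + 1) - pvS u a ≤ k))) : Int)

def pvResB (u : List Int) (k : Int) : Int := ((List.range u.length).map (fun m => pvCntLe u k m)).sum

-- nonzero-index prefix sums S 1 .. S n (the multiset A's prevsum dict holds)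
def pvPsums (u : List Int) : List Int := (List.range u.length).map (fun m => pvS u (m + 1))

lemma pvTrans_nonneg (x : Int) : 0 ≤ pvTrans x := by
  unfold pvTrans; split_ifs <;> norm_num

lemma pvS_succ (u : List Int) (a : Nat) (h : a < u.length) :
    pvS u (a + 1) = pvS u a + u.getD a 0 := by
  unfold pvS
  rw [List.sum_take_succ u a h, List.getD_eq_getElem u 0 h]

lemma pvS_mono (u : List Int) (hnn : ∀ y ∈ u, 0 ≤ y) {a b : Nat} (hab : a ≤ b) :
    pvS u a ≤ pvS u b := by
  have h1 : u.take b = u.take a ++ ((u.take b).drop a) := by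
    conv_lhs => rw [← List.take_append_drop a (u.take b)]
    rw [List.take_take, min_eq_left hab]
  have h2 : 0 ≤ ((u.take b).drop a).sum :=
    List.sum_nonneg (fun y hy => hnn y (List.mem_of_mem_take (List.mem_of_mem_drop hy)))
  unfold pvS
  rw [h1, List.sum_append]
  omega

-- step 1: the shared transform loop rewrites the first n entries through pvTrans
lemma pvTransform_eq (A : List Int) (n : Nat) (h : n ≤ A.length) :
    pvTransform (n : Int) A = (A.take n).map pvTrans ++ A.drop n := by
  induction n with
  | zero => simp [pvTransform, PySem.List.pyRange_one_eq_nil]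
  | succ n ih =>
    have hn : n ≤ A.length := by omega
    have hnA : n < A.length := by omega
    have hrange : PySem.List.pyRange 0 (((n + 1 : Nat)) : Int) 1
        = PySem.List.pyRange 0 (n : Int) 1 ++ [(n : Int)] := by
      rw [show (((n + 1 : Nat)) : Int) = (n : Int) + 1 by push_cast; ring]
      exact PySem.List.pyRange_one_succ_right (by positivity)
    unfold pvTransform at ih ⊢
    rw [hrange, List.foldl_append, ih hn]
    have hlen1 : ((A.take n).map pvTrans).length = n := by simp; omega
    have hget : PySem.List.pyGetD ((A.take n).map pvTrans ++ A.drop n) ((n : Int)) 0 = A[n] := by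
      rw [PySem.List.pyGetD_natCast]
      rw [List.getD_eq_getElem _ 0 (by simp; omega)]
      rw [List.getElem_append_right (by omega)]
      simp [Nat.min_eq_left hn]
    simp only [List.foldl_cons, List.foldl_nil, hget, PySem.List.pySetD_natCast]
    rw [List.set_append]
    simp only [hlen1, lt_irrefl, if_false]
    rw [List.drop_eq_getElem_cons hnA]
    simp only [Nat.sub_self, List.set_cons_zero]
    have hstep : (A.map pvTrans).take (n + 1) = (A.map pvTrans).take n ++ [pvTrans A[n]] := by
      rw [List.take_add_one]
      simp [List.getElem?_map, List.getElem?_eq_getElem hnA]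
    simp only [List.map_take] at *
    rw [hstep]
    simp

-- step 2: A's counting loop over the transformed list is a plain foldl over u
lemma solveA_fold_eq (u r : List Int) :
    (PySem.List.pyRange 0 (u.length : Int) 1).foldl
      (fun st i => pvStepA st (PySem.List.pyGetD (u ++ r) i 0)) (0, PySem.Dict.empty, 0)
    = u.foldl pvStepA (0, PySem.Dict.empty, 0) := by
  trans (PySem.List.pyRange 0 (u.length : Int) 1).foldl
      (fun st i => pvStepA st (PySem.List.pyGetD u i 0)) (0, PySem.Dict.empty, 0)
  · apply PySem.List.foldl_congr_mem
    intro acc x hx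
    rw [PySem.List.mem_pyRange_one] at hx
    congr 1
    have hlt : x.toNat < u.length := by omega
    rw [show x = ((x.toNat : Nat) : Int) by omega, PySem.List.pyGetD_natCast,
      PySem.List.pyGetD_natCast]
    simp [List.getD, List.getElem?_append_left hlt]
  · exact PySem.List.foldl_pyRange_zero_pyGetD' u 0 pvStepA (0, PySem.Dict.empty, 0)

-- step 3: closed form of A's loop state (prevsum is the counter of the prefix sums)
lemma pvS_append_le (u : List Int) (x : Int) (a : Nat) (h : a ≤ u.length) :
    pvS (u ++ [x]) a = pvS u a := by
  unfold pvS; rw [List.take_append_of_le_length h]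

lemma pvS_full (u : List Int) (a : Nat) (h : u.length ≤ a) : pvS u a = u.sum := by
  unfold pvS; rw [List.take_of_length_le h]

lemma pvPsums_append (u : List Int) (x : Int) :
    pvPsums (u ++ [x]) = pvPsums u ++ [u.sum + x] := by
  unfold pvPsums
  simp only [List.length_append, List.length_singleton]
  rw [List.range_succ, List.map_append]
  congr 1
  · apply List.map_congr_left; intro m hm
    rw [List.mem_range] at hm
    exact pvS_append_le u x (m + 1) (by omega)
  · simp only [List.map_cons, List.map_nil]
    rw [pvS_full _ _ (by simp)]
    simp

lemma pvMapS_append (u : List Int) (x : Int) :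
    (List.range (u.length + 1)).map (fun a => pvS (u ++ [x]) a) = 0 :: pvPsums u := by
  rw [List.range_succ_eq_map, List.map_cons, List.map_map]
  congr 1
  · unfold pvPsums
    apply List.map_congr_left
    intro m hm
    rw [List.mem_range] at hm
    exact pvS_append_le u x (m + 1) (by omega)

lemma pvCntEq_append_lt (u : List Int) (x : Int) (m : Nat) (hm : m < u.length) :
    pvCntEq (u ++ [x]) m = pvCntEq u m := by
  unfold pvCntEq
  have hl : (List.range (m + 1)).map (fun a => pvS (u ++ [x]) a)
      = (List.range (m + 1)).map (fun a => pvS u a) :=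
    List.map_congr_left (fun a ha => pvS_append_le u x a
      (by rw [List.mem_range] at ha; omega))
  rw [hl, pvS_append_le u x (m + 1) (by omega)]

lemma pvCntEq_append_last (u : List Int) (x : Int) :
    pvCntEq (u ++ [x]) u.length = ((0 :: pvPsums u).count (u.sum + x - 1) : Int) := by
  unfold pvCntEq
  rw [pvS_full _ _ (by simp), pvMapS_append u x]
  simp

lemma pvResA_append (u : List Int) (x : Int) :
    pvResA (u ++ [x]) = pvResA u + ((0 :: pvPsums u).count (u.sum + x - 1) : Int) := by
  unfold pvResA
  simp only [List.length_append, List.length_singleton]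
  rw [List.range_succ, List.map_append, List.sum_append]
  congr 2
  · exact List.map_congr_left (fun m hm => pvCntEq_append_lt u x m
      (by rw [List.mem_range] at hm; omega))
  · simp [pvCntEq_append_last]

lemma stepA_state (u : List Int) :
    u.foldl pvStepA (0, PySem.Dict.empty, 0)
      = (pvResA u, PySem.Dict.counter (pvPsums u), u.sum) := by
  induction u using List.reverseRecOn with
  | nil => simp [pvResA, pvPsums, PySem.Dict.counter]
  | append_singleton u x ih =>
    rw [List.foldl_append, ih]
    simp only [List.foldl_cons, List.foldl_nil]
    unfold pvStepA
    refine Prod.ext ?_ (Prod.ext ?_ ?_)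
    · show pvResA u + (if u.sum + x = 1 then 1 else 0)
        + (if (PySem.Dict.counter (pvPsums u)).contains (u.sum + x - 1) then
            (PySem.Dict.counter (pvPsums u)).getD (u.sum + x - 1) 0 else 0)
        = pvResA (u ++ [x])
      rw [pvResA_append, PySem.Dict.getD_counter, List.count_cons,
        PySem.Dict.contains_counter]
      by_cases hmem : (u.sum + x - 1) ∈ pvPsums u
      · have hc : (pvPsums u).contains (u.sum + x - 1) = true := by simpa using hmem
        rw [hc]
        push_cast
        split_ifs with h1 h2 h2 <;> simp_all <;> omega
      · have hc : (pvPsums u).contains (u.sum + x - 1) = false := by simpa using hmem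
        rw [hc, List.count_eq_zero.mpr hmem]
        push_cast
        split_ifs with h1 h2 h2 <;> simp_all <;> omega
    · show (PySem.Dict.counter (pvPsums u)).modify (u.sum + x) 0 (· + 1)
        = PySem.Dict.counter (pvPsums (u ++ [x]))
      rw [pvPsums_append, PySem.Dict.counter_append_singleton]
    · show u.sum + x = (u ++ [x]).sum
      simp


-- step 4: the while loop moves left to the least index whose window sum is ≤ k
lemma pvShrink_spec (t u : List Int) (k : Int) (hk : 0 ≤ k)
    (hread : ∀ i : Nat, i < u.length → PySem.List.pyGetD t (i : Int) 0 = u.getD i 0) :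
    ∀ (fuel l m : Nat), m < u.length → l ≤ m + 1 → m + 1 - l ≤ fuel →
      (∀ a, a < l → k < pvS u (m + 1) - pvS u a) →
      ∃ l' : Nat, pvShrink t k fuel (pvS u (m + 1) - pvS u l, (l : Int))
          = (pvS u (m + 1) - pvS u l', (l' : Int))
        ∧ l ≤ l' ∧ l' ≤ m + 1 ∧ pvS u (m + 1) - pvS u l' ≤ k
        ∧ (∀ a, a < l' → k < pvS u (m + 1) - pvS u a) := by
  intro fuel
  induction fuel with
  | zero =>
    intro l m hm hl hfuel hlow
    have hlm : l = m + 1 := by omega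
    refine ⟨l, rfl, le_refl l, by omega, ?_, hlow⟩
    subst hlm
    omega
  | succ fuel ih =>
    intro l m hm hl hfuel hlow
    by_cases hgt : k < pvS u (m + 1) - pvS u l
    · have hlm : l < m + 1 := by
        by_contra hc
        have : l = m + 1 := by omega
        subst this
        omega
      have hlu : l < u.length := by omega
      have hstep : pvS u (m + 1) - pvS u l - PySem.List.pyGetD t (l : Int) 0
          = pvS u (m + 1) - pvS u (l + 1) := by
        rw [hread l hlu, pvS_succ u l hlu]
        ring
      have := ih (l + 1) m hm (by omega) (by omega)
        (by
          intro a ha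
          by_cases hal : a < l
          · exact hlow a hal
          · have : a = l := by omega
            subst this
            exact hgt)
      obtain ⟨l', heq, h1, h2, h3, h4⟩ := this
      refine ⟨l', ?_, by omega, h2, h3, h4⟩
      show pvShrink t k (fuel + 1) (pvS u (m + 1) - pvS u l, (l : Int)) = _
      unfold pvShrink
      rw [if_pos hgt, hstep]
      rw [show ((l : Int) + 1) = ((l + 1 : Nat) : Int) by push_cast; ring]
      exact heq
    · refine ⟨l, ?_, le_refl l, by omega, by omega, hlow⟩
      unfold pvShrink
      rw [if_neg hgt]

-- step 5: closed form of at_most's loop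
lemma pvCount_ge (n c : Nat) : (List.range n).countP (fun a => decide (c ≤ a)) = n - c := by
  induction n with
  | zero => simp
  | succ n ih =>
    rw [List.range_succ, List.countP_append, ih]
    by_cases h : c ≤ n <;> (simp [h]; omega)

lemma pvAtMost_spec (t u : List Int) (k : Int) (hk : 0 ≤ k)
    (hread : ∀ i : Nat, i < u.length → PySem.List.pyGetD t (i : Int) 0 = u.getD i 0)
    (hlen : u.length ≤ t.length) (hnn : ∀ y ∈ u, 0 ≤ y) :
    ∀ m : Nat, m ≤ u.length →
      ∃ l : Nat, (PySem.List.pyRange 0 (m : Int) 1).foldl (pvStepB t k) (0, 0, 0)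
          = (((List.range m).map (fun j => pvCntLe u k j)).sum, (l : Int), pvS u m - pvS u l)
        ∧ l ≤ m ∧ pvS u m - pvS u l ≤ k
        ∧ (∀ a, a < l → k < pvS u m - pvS u a) := by
  intro m
  induction m with
  | zero =>
    intro _
    refine ⟨0, ?_, le_refl 0, by simpa using hk, by omega⟩
    rw [PySem.List.pyRange_one_eq_nil (by omega)]
    simp
  | succ m ih =>
    intro hm1
    have hmu : m < u.length := by omega
    obtain ⟨l, heq, hlm, hle, hlow⟩ := ih (by omega)
    have hrange : PySem.List.pyRange 0 (((m + 1 : Nat)) : Int) 1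
        = PySem.List.pyRange 0 (m : Int) 1 ++ [(m : Int)] := by
      rw [show (((m + 1 : Nat)) : Int) = (m : Int) + 1 by push_cast; ring]
      exact PySem.List.pyRange_one_succ_right (by positivity)
    rw [hrange, List.foldl_append, heq]
    simp only [List.foldl_cons, List.foldl_nil]
    have hs : pvS u m - pvS u l + PySem.List.pyGetD t (m : Int) 0
        = pvS u (m + 1) - pvS u l := by
      rw [hread m hmu, pvS_succ u m hmu]; ring
    obtain ⟨l', heq', h1, h2, h3, h4⟩ := pvShrink_spec t u k hk hread t.length l m hmu
      (by omega) (by omega)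
      (by
        intro a ha
        have := hlow a ha
        have hmono := pvS_mono u hnn (show m ≤ m + 1 by omega)
        omega)
    refine ⟨l', ?_, by omega, h3, h4⟩
    unfold pvStepB
    simp only [hs, heq']
    refine Prod.ext ?_ rfl
    show ((List.range m).map (fun j => pvCntLe u k j)).sum + ((m : Int) - (l' : Int) + 1)
      = ((List.range (m + 1)).map (fun j => pvCntLe u k j)).sum
    rw [List.range_succ, List.map_append, List.sum_append]
    simp only [List.map_cons, List.map_nil, List.sum_cons, List.sum_nil]
    have hcnt : pvCntLe u k m = (m : Int) - (l' : Int) + 1 := by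
      unfold pvCntLe
      have hcong : (List.range (m + 1)).countP (fun a => decide (pvS u (m + 1) - pvS u a ≤ k))
          = (List.range (m + 1)).countP (fun a => decide (l' ≤ a)) := by
        apply List.countP_congr
        intro a ha
        rw [List.mem_range] at ha
        rw [Bool.eq_iff_iff]
        simp only [decide_eq_true_eq, iff_true]
        constructor
        · intro hle'
          by_contra hc
          exact absurd hle' (not_le.mpr (h4 a (by omega)))
        · intro hla
          have := pvS_mono u hnn hla
          omega
      rw [hcong, pvCount_ge]
      push_cast [Nat.cast_sub (by omega : l' ≤ m + 1)]
      ring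
    omega

-- step 6: per-step arithmetic: #(≤1) − #(≤0) = #(=1)
lemma pvCountP_split (l : List Nat) (d : Nat → Int) :
    l.countP (fun a => decide (d a ≤ 1))
      = l.countP (fun a => decide (d a ≤ 0)) + l.countP (fun a => decide (d a = 1)) := by
  induction l with
  | nil => simp
  | cons x xs ih =>
    simp only [List.countP_cons, ih]
    by_cases h1 : d x ≤ 1 <;> by_cases h2 : d x ≤ 0 <;> by_cases h3 : d x = 1 <;>
      simp [h1, h2, h3] <;> omega

lemma pvCnt_split (u : List Int) (m : Nat) :
    pvCntLe u 1 m = pvCntLe u 0 m + pvCntEq u m := by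
  unfold pvCntLe pvCntEq
  rw [List.count, List.countP_map]
  have he : (List.range (m + 1)).countP ((fun x => x == pvS u (m + 1) - 1) ∘ fun a => pvS u a)
      = (List.range (m + 1)).countP (fun a => decide (pvS u (m + 1) - pvS u a = 1)) := by
    apply List.countP_congr
    intro a _
    rw [Bool.eq_iff_iff]
    simp only [Function.comp, beq_iff_eq, decide_eq_true_eq, iff_true]
    constructor <;> intro h <;> omega
  rw [he, pvCountP_split (List.range (m + 1)) (fun a => pvS u (m + 1) - pvS u a)]
  push_cast
  ring

lemma pvResB_split (u : List Int) : pvResB u 1 = pvResB u 0 + pvResA u := by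
  unfold pvResB pvResA
  rw [List.map_congr_left (fun m _ => pvCnt_split u m), List.sum_map_add]

-- ===== VERDICT (by name: the statement is the Claim_ definition above) =====
lemma pvGetD_append_lt (u r : List Int) (i : Nat) (h : i < u.length) :
    PySem.List.pyGetD (u ++ r) (i : Int) 0 = u.getD i 0 := by
  rw [PySem.List.pyGetD_natCast]
  simp [List.getD, List.getElem?_append_left h]

theorem solve_spec : Claim_equal_solve := by
  unfold Claim_equal_solve Spec_solve
  intro N A _ hpre
  unfold solve solve_alt
  dsimp only
  by_cases hN : N ≤ 0
  · rw [PySem.List.pyRange_one_eq_nil hN]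
    simp [pvAtMost, PySem.List.pyRange_one_eq_nil hN]
  · have hN0 : 0 ≤ N := by omega
    have hNn : N = (N.toNat : Int) := by omega
    set n := N.toNat with hn
    have hnA : n ≤ A.length := by
      unfold Pre_solve at hpre
      omega
    have ht := pvTransform_eq A n hnA
    set u := (A.take n).map pvTrans with hudef
    have hu : u.length = n := by
      rw [hudef, List.length_map, List.length_take]
      omega
    have hnn : ∀ y ∈ u, 0 ≤ y := by
      intro y hy
      rw [hudef, List.mem_map] at hy
      obtain ⟨z, _, hz⟩ := hy
      rw [← hz]
      exact pvTrans_nonneg z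
    have hread : ∀ i : Nat, i < u.length →
        PySem.List.pyGetD (u ++ A.drop n) (i : Int) 0 = u.getD i 0 :=
      fun i hi => pvGetD_append_lt u (A.drop n) i hi
    have hlen : u.length ≤ (u ++ A.drop n).length := by
      simp
    rw [hNn, ht]
    -- A side
    have hAfold := solveA_fold_eq u (A.drop n)
    rw [hu] at hAfold
    rw [hAfold, stepA_state]
    -- B side
    obtain ⟨l1, heq1, -, -, -⟩ := pvAtMost_spec (u ++ A.drop n) u 1 (by norm_num)
      hread hlen hnn n (by omega)
    obtain ⟨l0, heq0, -, -, -⟩ := pvAtMost_spec (u ++ A.drop n) u 0 (by norm_num)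
      hread hlen hnn n (by omega)
    unfold pvAtMost
    rw [heq1, heq0]
    have hres : pvResB u 1 = pvResB u 0 + pvResA u := pvResB_split u
    unfold pvResB at hres
    rw [hu] at hres
    simp only
    omega
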